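-- pv_equiv track=rewrite | github.com/jeremypmobley/nonsense | euchre/utils/utils.py | choose_open_trump
-- ===== SOURCE A (Python) =====
-- def choose_open_trump(hand: list,
--                       card_flipped_up: str) -> str:
--     """
--     Function to choose trump after card is turned down
--     If hand has at least 3 trump cards
--
--     :param hand: List of cards in player's hand
--     :param card_flipped_up: Card flipped up
--     :returns trump
--     """
--     # TODO: pass in player/position/strategy to play
--
--     suits_eligible = ['S', 'C', 'H', 'D']
--     suits_eligible.remove(card_flipped_up[-1])
--     for suit in suits_eligible:
--         trumps = 0
--         for card in hand:
--             if card[-1] == suit: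
--                 trumps += 1
--         if trumps >= 3:
--             return suit
-- ===== SOURCE B (Python) =====
-- def choose_open_trump(hand: list,
--                       card_flipped_up: str) -> str:
--     """Choose trump after the flipped card is turned down.
--
--     Sort the hand's suit letters so equal suits become adjacent, detect runs
--     of length >= 3 in one linear run-length scan (no per-suit counting), then
--     return the highest-priority eligible suit among the strong suits.
--     """
--     suits = sorted(card[-1] for card in hand)
--     strong = set()
--     prev = None
--     run = 0
--     for s in suits:
--         if s == prev:
--             run += 1
--         else:
--             prev = s
--             run = 1
--         if run == 3:
--             strong.add(s)
--     flipped = card_flipped_up[-1]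
--     for suit in ['S', 'C', 'H', 'D']:
--         if suit != flipped and suit in strong:
--             return suit
-- ===== Notes on version B (the rewrite author's own statement) =====
-- stated objective: alternative
-- what changed: B sorts the hand's suit letters and finds suits with runs of length >= 3 in one linear run-length scan over the sorted list, instead of A's per-suit rescans of the whole hand; the eligible-suit priority order is kept.
import Mathlib
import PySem

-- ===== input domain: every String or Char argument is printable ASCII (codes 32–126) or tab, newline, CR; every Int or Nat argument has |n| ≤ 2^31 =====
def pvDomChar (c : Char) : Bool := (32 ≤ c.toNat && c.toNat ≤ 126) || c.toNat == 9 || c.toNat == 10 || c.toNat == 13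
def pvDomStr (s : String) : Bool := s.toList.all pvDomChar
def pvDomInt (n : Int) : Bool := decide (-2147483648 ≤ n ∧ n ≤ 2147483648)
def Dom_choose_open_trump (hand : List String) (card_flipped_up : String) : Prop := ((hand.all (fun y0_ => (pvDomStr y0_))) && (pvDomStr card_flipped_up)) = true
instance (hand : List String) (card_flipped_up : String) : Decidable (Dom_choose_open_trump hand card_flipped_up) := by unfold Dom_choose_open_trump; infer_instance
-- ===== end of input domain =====

-- B sorts the hand's suit letters and detects suits with runs >= 3 in one linear scan, replacing A's per-suit rescans (alternative algorithm; same result).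


-- ===== PORT A =====
-- inner loop: 'trumps = 0; for card in hand: if card[-1] == suit: trumps += 1' (none = a card raised IndexError)
def cotCount (hand : List String) (suit : Char) (trumps : Int) : Option Int :=
  match hand with
  | [] => some trumps
  | card :: rest =>
    match PySem.Str.pyGet? card (-1) with
    | none => none
    | some c => cotCount rest suit (if c == suit then trumps + 1 else trumps)

-- outer loop: 'for suit in suits_eligible: … if trumps >= 3: return suit'
def cotLoop (suits : List Char) (hand : List String) : Option String :=
  match suits with
  | [] => none
  | suit :: rest =>
    match cotCount hand suit 0 with
    | none => none
    | some trumps => if trumps ≥ 3 then some (String.ofList [suit]) else cotLoop rest hand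

def choose_open_trump (hand : List String) (card_flipped_up : String) : Option String :=
  match PySem.Str.pyGet? card_flipped_up (-1) with
  | none => none
  | some fc =>
    match PySem.List.remove? ['S', 'C', 'H', 'D'] fc with
    | none => none
    | some suits_eligible => cotLoop suits_eligible hand

-- ===== PORT B =====
-- 'card[-1] for card in hand' (the generator inside sorted; none = a card raised IndexError)
def cotLasts (hand : List String) : Option (List Char) :=
  match hand with
  | [] => some []
  | card :: rest =>
    match PySem.Str.pyGet? card (-1) with
    | none => none
    | some c => (cotLasts rest).map (fun t => c :: t)

-- run-length scan: 'for s in suits: if s == prev: run += 1 else: prev, run = s, 1; if run == 3: strong.add(s)'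
def cotScan (suits : List Char) (prev : Option Char) (run : Int) (strong : PySem.Set Char) : PySem.Set Char :=
  match suits with
  | [] => strong
  | s :: rest =>
    let run' := if some s == prev then run + 1 else 1
    cotScan rest (some s) run' (if run' == 3 then PySem.Set.add strong s else strong)

-- 'for suit in ['S','C','H','D']: if suit != flipped and suit in strong: return suit'
def cotPick (suits : List Char) (flipped : Char) (strong : PySem.Set Char) : Option String :=
  match suits with
  | [] => none
  | s :: rest =>
    if s != flipped && PySem.Set.contains strong s then some (String.ofList [s])
    else cotPick rest flipped strong

def choose_open_trump_alt (hand : List String) (card_flipped_up : String) : Option String :=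
  match cotLasts hand with
  | none => none
  | some lasts =>
    let suits := PySem.List.sorted lasts (fun x => x) false
    let strong := cotScan suits none 0 PySem.Set.empty
    match PySem.Str.pyGet? card_flipped_up (-1) with
    | none => none
    | some flipped => cotPick ['S', 'C', 'H', 'D'] flipped strong

-- ===== PRECONDITION & SPEC =====
-- Pre_ excludes exactly the inputs on which the Python A raises: an empty card_flipped_up (IndexError),
-- a last character of card_flipped_up outside {S,C,H,D} (ValueError from list.remove),
-- and an empty string in the hand (IndexError on card[-1]).
def Pre_choose_open_trump (hand : List String) (card_flipped_up : String) : Prop :=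
  ((PySem.Str.pyGet? card_flipped_up (-1)).any
      (fun fc => fc ∈ (['S', 'C', 'H', 'D'] : List Char))) = true ∧
  ∀ c ∈ hand, c.toList ≠ []
instance (hand : List String) (card_flipped_up : String) : Decidable (Pre_choose_open_trump hand card_flipped_up) := by unfold Pre_choose_open_trump; infer_instance

def pvWitness_choose_open_trump : List String × String := (["9S", "JS", "QS", "KH"], "AD")

def Spec_choose_open_trump (hand : List String) (card_flipped_up : String) (out : Option String) : Prop := out = choose_open_trump_alt hand card_flipped_up
instance (hand : List String) (card_flipped_up : String) (out : Option String) : Decidable (Spec_choose_open_trump hand card_flipped_up out) := by unfold Spec_choose_open_trump; infer_instance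

-- ===== CLAIM (what is proved, stated in full; the proofs are below) =====
def Claim_equal_choose_open_trump : Prop := ∀ (hand : List String) (card_flipped_up : String), Dom_choose_open_trump hand card_flipped_up → Pre_choose_open_trump hand card_flipped_up → Spec_choose_open_trump hand card_flipped_up (choose_open_trump hand card_flipped_up)

-- ===== LEMMAS AND PROOFS =====

-- the last character of a nonempty string is there
theorem cot_last_isSome (s : String) (h : s.toList ≠ []) :
    ∃ c, PySem.Str.pyGet? s (-1) = some c := by
  simp only [PySem.Str.pyGet?_eq, PySem.Chars.pyGet?_eq_listPyGet?, PySem.List.pyGet?_neg_one]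
  exact Option.isSome_iff_exists.mp (List.getLast?_isSome.mpr h)

-- A's inner count succeeds and counts last characters
theorem cotCount_eq (hand : List String) (suit : Char) (acc : Int)
    (h : ∀ c ∈ hand, c.toList ≠ []) :
    cotCount hand suit acc =
      some (acc + ((hand.map (fun c => (PySem.Str.pyGet? c (-1)).getD ' ')).count suit : Int)) := by
  induction hand generalizing acc with
  | nil => simp [cotCount]
  | cons card rest ih =>
    obtain ⟨c, hc⟩ := cot_last_isSome card (h card (by simp))
    have hrest : ∀ c ∈ rest, c.toList ≠ [] := fun x hx => h x (by simp [hx])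
    simp only [cotCount, hc, ih _ hrest, List.map_cons, List.count_cons, Option.getD_some]
    by_cases hcs : c = suit
    · simp only [hcs, beq_self_eq_true, if_true]
      congr 1; push_cast; ring
    · simp only [beq_iff_eq, if_neg hcs, add_zero]

-- B's generator succeeds and produces the last characters
theorem cotLasts_eq (hand : List String) (h : ∀ c ∈ hand, c.toList ≠ []) :
    cotLasts hand = some (hand.map (fun c => (PySem.Str.pyGet? c (-1)).getD ' ')) := by
  induction hand with
  | nil => simp [cotLasts]
  | cons card rest ih =>
    obtain ⟨c, hc⟩ := cot_last_isSome card (h card (by simp))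
    have hrest : ∀ x ∈ rest, x.toList ≠ [] := fun x hx => h x (by simp [hx])
    simp only [cotLasts, hc, ih hrest, Option.map_some, List.map_cons, Option.getD_some]

-- the run-length scan over a sorted list collects exactly the elements of count >= 3
theorem cotScan_mem (L : List Char) (prev : Option Char) (run : Int) (strong : PySem.Set Char)
    (hs : L.Pairwise (· ≤ ·))
    (hmon : ∀ p, prev = some p → ∀ x ∈ L, p ≤ x)
    (h3 : ∀ p, prev = some p → 3 ≤ run → p ∈ strong)
    (h0 : 0 ≤ run) (s : Char) :
    s ∈ cotScan L prev run strong ↔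
      s ∈ strong ∨ 3 ≤ L.count s ∨ (prev = some s ∧ 3 ≤ run + (L.count s : Int)) := by
  induction L generalizing prev run strong with
  | nil =>
    simp only [cotScan, List.count_nil, Nat.cast_zero, add_zero]
    constructor
    · exact fun h => Or.inl h
    · rintro (h | h | ⟨hp, hr⟩)
      · exact h
      · omega
      · exact h3 s hp hr
  | cons a t ih =>
    have hst : t.Pairwise (· ≤ ·) := hs.tail
    have hat : ∀ x ∈ t, a ≤ x := fun x hx => (List.pairwise_cons.mp hs).1 x hx
    by_cases hpa : prev = some a
    · -- continuing a run of a
      subst hpa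
      simp only [cotScan, beq_self_eq_true, if_true]
      set strong' := if ((run + 1 == 3 : Bool)) then PySem.Set.add strong a else strong with hstrong'
      have hmem' : ∀ x, x ∈ strong' ↔ (x ∈ strong ∨ (x = a ∧ run + 1 = 3)) := by
        intro x
        by_cases h : run + 1 = 3
        · simp only [hstrong', h]
          simp [PySem.Set.mem_add]
        · simp [hstrong', h]
      have ihh := ih (some a) (run + 1) strong' hst
        (fun p hp x hx => by injection hp with hp; subst hp; exact hat x hx)
        (fun p hp hr => by
          injection hp with hp; subst hp
          refine (hmem' _).mpr ?_
          by_cases h : run + 1 = 3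
          · exact Or.inr ⟨rfl, h⟩
          · exact Or.inl (h3 _ rfl (by omega)))
        (by omega)
      rw [ihh, hmem', List.count_cons]
      by_cases hsa : s = a
      · subst hsa
        have hr3 := h3 s rfl
        by_cases hm : s ∈ strong
        · simp [hm]
        · have hrun : ¬ (3 : Int) ≤ run := fun h => hm (hr3 h)
          simp only [hm, false_or, beq_self_eq_true, if_true, true_and]
          push_cast
          omega
      · by_cases hm : s ∈ strong
        · simp [hm]
        · simp [hm, hsa, Ne.symm hsa]
    · -- a new run starts at a
      have hba : ((some a == prev : Bool)) = false :=
        beq_eq_false_iff_ne.mpr (fun h => hpa h.symm)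
      simp only [cotScan, hba, Bool.false_eq_true, if_false,
        show (((1 : Int) == 3 : Bool)) = false by decide]
      have ihh := ih (some a) 1 strong hst
        (fun p hp x hx => by injection hp with hp; subst hp; exact hat x hx)
        (fun p hp hr => by omega)
        (by omega)
      rw [ihh, List.count_cons]
      by_cases hsa : s = a
      · subst hsa
        by_cases hm : s ∈ strong
        · simp [hm]
        · simp only [hm, false_or, hpa, false_and, or_false, beq_self_eq_true, if_true,
            true_and]
          push_cast
          omega
      · by_cases hp : prev = some s
        · -- prev = some s with s ≠ a: s is below every element, so it never recurs
          have hle : s ≤ a := hmon s hp a (by simp)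
          have hlt : s < a := lt_of_le_of_ne hle hsa
          have hcount : t.count s = 0 := by
            rw [List.count_eq_zero]
            intro hmem
            exact absurd (hat s hmem) (not_le.mpr hlt)
          by_cases hm : s ∈ strong
          · simp [hm]
          · have hrun : ¬ (3 : Int) ≤ run := fun h => hm (h3 s hp h)
            simp [hm, hp, hcount, hrun, Ne.symm hsa]
        · by_cases hm : s ∈ strong
          · simp [hm]
          · simp [hm, hp, Ne.symm hsa]

-- the strong set from a fresh scan of the sorted suits is { s | count >= 3 }
theorem cotScan_sorted_mem (lasts : List Char) (s : Char) :
    s ∈ cotScan (PySem.List.sorted lasts (fun x => x) false) none 0 PySem.Set.empty ↔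
      3 ≤ lasts.count s := by
  rw [cotScan_mem _ none 0 PySem.Set.empty
        (by simpa using PySem.List.sorted_pairwise lasts (fun x => x))
        (fun p hp => by cases hp) (fun p hp => by cases hp) le_rfl]
  have hperm := PySem.List.sorted_perm lasts (fun x => x) false
  rw [hperm.count_eq]
  constructor
  · rintro (h | h | ⟨h, _⟩)
    · cases h
    · exact h
    · cases h
  · exact fun h => Or.inr (Or.inl h)

-- the two final loops agree: A over the remove-result, B over all four suits skipping flipped
theorem cotLoop_eq_cotPick (suits : List Char) (flipped : Char) (hand : List String)
    (strong : PySem.Set Char)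
    (hh : ∀ c ∈ hand, c.toList ≠ [])
    (hstr : ∀ s, s ∈ strong ↔ 3 ≤ (hand.map (fun c => (PySem.Str.pyGet? c (-1)).getD ' ')).count s) :
    cotLoop (suits.filter (fun s => s != flipped)) hand = cotPick suits flipped strong := by
  induction suits with
  | nil => simp [cotPick, cotLoop]
  | cons s rest ih =>
    by_cases hsf : s = flipped
    · subst hsf
      have hb : ((s != s : Bool)) = false := by simp
      simp only [List.filter_cons, hb, cotPick, Bool.false_and, Bool.false_eq_true,
        if_false]
      exact ih
    · have hb : ((s != flipped : Bool)) = true := by simp [hsf]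
      simp only [List.filter_cons, hb, if_true, cotLoop, cotPick,
        cotCount_eq hand s 0 hh, Bool.true_and, zero_add]
      by_cases h3 : 3 ≤ (hand.map (fun c => (PySem.Str.pyGet? c (-1)).getD ' ')).count s
      · have hc : PySem.Set.contains strong s = true :=
          (PySem.Set.contains_iff strong s).mpr ((hstr s).mpr h3)
        rw [hc, if_pos (by exact_mod_cast h3)]
        simp
      · have hc : PySem.Set.contains strong s = false := by
          by_contra hcc
          exact h3 ((hstr s).mp ((PySem.Set.contains_iff strong s).mp
            (Bool.ne_false_iff.mp hcc)))
        rw [hc, if_neg (by exact_mod_cast h3)]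
        simpa using ih

-- ===== VERDICT (by name: the statement is the Claim_ definition above) =====
theorem choose_open_trump_spec : Claim_equal_choose_open_trump := by
  intro hand cfu _ hpre
  obtain ⟨hfc, hhand⟩ := hpre
  unfold Spec_choose_open_trump choose_open_trump choose_open_trump_alt
  obtain ⟨fc, hget, hmem⟩ : ∃ fc, PySem.Str.pyGet? cfu (-1) = some fc ∧ fc ∈ (['S','C','H','D'] : List Char) := by
    cases hg : PySem.Str.pyGet? cfu (-1) with
    | none => rw [hg] at hfc; simp [Option.any] at hfc
    | some c => exact ⟨c, rfl, by rw [hg] at hfc; simpa using hfc⟩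
  have hrem : PySem.List.remove? (['S','C','H','D'] : List Char) fc
      = some ((['S','C','H','D'] : List Char).filter (fun s => s != fc)) := by
    fin_cases hmem <;> decide
  simp only [hget, hrem, cotLasts_eq hand hhand]
  exact cotLoop_eq_cotPick ['S','C','H','D'] fc hand _ hhand
    (fun s => cotScan_sorted_mem _ s)
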